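-- pv_equiv track=rewrite | github.com/wjohnson4th/Advent-of-Code-2024 | day 7/day7.py | checkRstOrderConsistant
-- ===== SOURCE A (Python) =====
-- def checkRstOrderConsistant(rst:int,digits:list,permutation) -> bool:
--     #operations = ["+","*"]
--     check = 0
--
--     #do multiplication first
--     #get indexes where perumtation is multiplication
--     multIndex = [i for i,x in enumerate(permutation) if x==1]
--     #within multIndex group adjacent ints
--     additionGroups:list[list] = []
--     for i in range(len(digits)):
--         if i == 0:
--             additionGroups.append([i])
--         elif i-1 in multIndex:
--             additionGroups[-1].append(i)
--         else:
--             additionGroups.append([i])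
--
--
--     for group in additionGroups:
--         runSum = 1
--         for idx in group:
--             runSum = digits[idx]*runSum
--         check += runSum
--
--
--     return check == rst
-- ===== SOURCE B (Python) =====
-- def checkRstOrderConsistant(rst: int, digits: list, permutation) -> bool:
--     # single left-to-right pass: keep a running product and a running total
--     if not digits:
--         return 0 == rst
--     mult = {i for i, x in enumerate(permutation) if x == 1}
--     total = 0
--     run = digits[0]
--     for i in range(1, len(digits)):
--         if i - 1 in mult:
--             run *= digits[i]
--         else:
--             total += run
--             run = digits[i]
--     return total + run == rst
-- ===== Notes on version B (the rewrite author's own statement) =====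
-- stated objective: simpler
-- what changed: Replaces A's two-phase group-index construction (building additionGroups as a list of index lists, then summing per-group products) with a single left-to-right pass keeping a running product and a running total, with the multiplication positions in a set.
import Mathlib
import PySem

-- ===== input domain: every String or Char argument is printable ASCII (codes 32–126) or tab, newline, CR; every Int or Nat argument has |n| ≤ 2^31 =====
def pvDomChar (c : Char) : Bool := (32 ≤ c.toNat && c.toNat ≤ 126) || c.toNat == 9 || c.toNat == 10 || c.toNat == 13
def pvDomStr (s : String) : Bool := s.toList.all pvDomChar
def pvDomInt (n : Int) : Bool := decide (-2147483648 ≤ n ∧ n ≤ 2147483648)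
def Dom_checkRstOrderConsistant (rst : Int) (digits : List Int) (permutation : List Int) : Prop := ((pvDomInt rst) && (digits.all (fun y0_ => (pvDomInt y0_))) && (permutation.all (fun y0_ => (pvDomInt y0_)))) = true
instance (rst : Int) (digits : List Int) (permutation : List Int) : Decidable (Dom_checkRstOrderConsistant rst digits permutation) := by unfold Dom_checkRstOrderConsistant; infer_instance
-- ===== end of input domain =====

-- B replaces A's group-index table with a single running-product/running-total pass; objective: simpler.

-- ===== PORT A =====
-- [i for i,x in enumerate(permutation) if x == 1]
def pvMultIndex (permutation : List Int) : List Int :=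
  ((PySem.List.enumerate permutation).filter (fun p => p.2 == 1)).map (fun p => p.1)

-- one iteration of A's group-building loop (additionGroups[-1].append(i) is
-- dropLast ++ [last ++ [i]]; exact since at i ≥ 1 the list is nonempty, and at i = 0 the first branch fires)
def pvStepA (multIndex : List Int) (groups : List (List Int)) (i : Int) : List (List Int) :=
  if i = 0 then groups ++ [[i]]
  else if (i - 1) ∈ multIndex then groups.dropLast ++ [(groups.getLastD []) ++ [i]]
  else groups ++ [[i]]

-- inner loop: runSum = digits[idx]*runSum  (idx always in range, so pyGetD is exact)
def pvEvalGroup (digits : List Int) (group : List Int) : Int :=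
  group.foldl (fun runSum idx => PySem.List.pyGetD digits idx 0 * runSum) 1

def checkRstOrderConsistant (rst : Int) (digits : List Int) (permutation : List Int) : Bool :=
  let multIndex := pvMultIndex permutation
  let additionGroups :=
    (PySem.List.pyRange 0 (digits.length : Int) 1).foldl (pvStepA multIndex) []
  let check :=
    additionGroups.foldl (fun check group => check + pvEvalGroup digits group) 0
  check == rst

-- ===== PORT B =====
-- one iteration of B's single pass: state = (total, run)
def pvStepB (mult : PySem.Set Int) (digits : List Int) (st : Int × Int) (i : Int) : Int × Int :=
  if (i - 1) ∈ mult then (st.1, st.2 * PySem.List.pyGetD digits i 0)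
  else (st.1 + st.2, PySem.List.pyGetD digits i 0)

def checkRstOrderConsistant_alt (rst : Int) (digits : List Int) (permutation : List Int) : Bool :=
  match digits with
  | [] => (0 : Int) == rst
  | d0 :: _ =>
    let mult : PySem.Set Int := PySem.Set.ofList (pvMultIndex permutation)
    let st :=
      (PySem.List.pyRange 1 (digits.length : Int) 1).foldl (pvStepB mult digits) (0, d0)
    (st.1 + st.2) == rst

-- ===== PRECONDITION & SPEC =====
def Spec_checkRstOrderConsistant (rst : Int) (digits : List Int) (permutation : List Int) (out : Bool) : Prop := out = checkRstOrderConsistant_alt rst digits permutation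
instance (rst : Int) (digits : List Int) (permutation : List Int) (out : Bool) : Decidable (Spec_checkRstOrderConsistant rst digits permutation out) := by unfold Spec_checkRstOrderConsistant; infer_instance

-- ===== CLAIM (what is proved, stated in full; the proofs are below) =====
def Claim_equal_checkRstOrderConsistant : Prop := ∀ (rst : Int) (digits : List Int) (permutation : List Int), Dom_checkRstOrderConsistant rst digits permutation → Spec_checkRstOrderConsistant rst digits permutation (checkRstOrderConsistant rst digits permutation)

-- ===== LEMMAS AND PROOFS =====

-- sum of evaluated groups, as A's outer loop computes it
def pvSumGroups (digits : List Int) (gs : List (List Int)) : Int :=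
  gs.foldl (fun check group => check + pvEvalGroup digits group) 0

lemma pvSumGroups_append (digits : List Int) (gs : List (List Int)) (g : List Int) :
    pvSumGroups digits (gs ++ [g]) = pvSumGroups digits gs + pvEvalGroup digits g := by
  simp [pvSumGroups]

lemma pvEvalGroup_append (digits : List Int) (g : List Int) (i : Int) :
    pvEvalGroup digits (g ++ [i]) = PySem.List.pyGetD digits i 0 * pvEvalGroup digits g := by
  simp [pvEvalGroup]

-- the loop invariant: after processing indices 0..n-1 (A) resp. 1..n-1 (B),
-- A's groups decompose as gs ++ [last] with B's total = Σ gs and B's run = eval last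
lemma pvInvariant (digits : List Int) (M : List Int) (n : Nat) (hn : 1 ≤ n) :
    ∃ gs last,
      (PySem.List.pyRange 0 (n : Int) 1).foldl (pvStepA M) [] = gs ++ [last] ∧
      ((PySem.List.pyRange 1 (n : Int) 1).foldl (pvStepB (PySem.Set.ofList M) digits)
          (0, PySem.List.pyGetD digits 0 0)).1 = pvSumGroups digits gs ∧
      ((PySem.List.pyRange 1 (n : Int) 1).foldl (pvStepB (PySem.Set.ofList M) digits)
          (0, PySem.List.pyGetD digits 0 0)).2 = pvEvalGroup digits last := by
  induction n with
  | zero => omega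
  | succ m ih =>
    by_cases hm : 1 ≤ m
    · obtain ⟨gs, last, hg, h1, h2⟩ := ih hm
      have e0 : ((m + 1 : Nat) : Int) = (m : Int) + 1 := by push_cast; ring
      have eA : PySem.List.pyRange 0 ((m + 1 : Nat) : Int) 1
          = PySem.List.pyRange 0 (m : Int) 1 ++ [(m : Int)] := by
        rw [e0]; exact PySem.List.pyRange_one_succ_right (by exact_mod_cast Nat.zero_le m)
      have eB : PySem.List.pyRange 1 ((m + 1 : Nat) : Int) 1
          = PySem.List.pyRange 1 (m : Int) 1 ++ [(m : Int)] := by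
        rw [e0]; exact PySem.List.pyRange_one_succ_right (by exact_mod_cast hm)
      rw [eA, eB, List.foldl_append, List.foldl_append]
      simp only [List.foldl_cons, List.foldl_nil]
      have hm0n : ¬ (m = 0) := by omega
      by_cases hmem : ((m : Int) - 1) ∈ M
      · refine ⟨gs, last ++ [(m : Int)], ?_, ?_, ?_⟩
        · rw [hg]; simp [pvStepA, hm0n, hmem]
        · simp [pvStepB, PySem.Set.mem_ofList, hmem, h1]
        · simp [pvStepB, PySem.Set.mem_ofList, hmem, h2, pvEvalGroup_append, Int.mul_comm]
      · refine ⟨gs ++ [last], [(m : Int)], ?_, ?_, ?_⟩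
        · rw [hg]; simp [pvStepA, hm0n, hmem]
        · simp [pvStepB, PySem.Set.mem_ofList, hmem, h1, h2, pvSumGroups_append]
        · simp [pvStepB, PySem.Set.mem_ofList, hmem, pvEvalGroup]
    · -- n = 1: base case
      have hm1 : m = 0 := by omega
      subst hm1
      refine ⟨[], [(0 : Int)], ?_, ?_, ?_⟩
      · have : PySem.List.pyRange 0 ((1 : Nat) : Int) 1 = [(0 : Int)] := by decide
        rw [this]; simp [pvStepA]
      · have : PySem.List.pyRange 1 ((1 : Nat) : Int) 1 = [] := by decide
        rw [this]; simp [pvSumGroups]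
      · have : PySem.List.pyRange 1 ((1 : Nat) : Int) 1 = [] := by decide
        rw [this]; simp [pvEvalGroup]

-- ===== VERDICT (by name: the statement is the Claim_ definition above) =====
theorem checkRstOrderConsistant_spec : Claim_equal_checkRstOrderConsistant := by
  intro rst digits permutation _
  unfold Spec_checkRstOrderConsistant
  cases digits with
  | nil =>
    simp [checkRstOrderConsistant, checkRstOrderConsistant_alt,
      PySem.List.pyRange_one_eq_nil]
  | cons d0 rest =>
    have hn : 1 ≤ (d0 :: rest).length := by simp
    obtain ⟨gs, last, hg, h1, h2⟩ :=
      pvInvariant (d0 :: rest) (pvMultIndex permutation) (d0 :: rest).length hn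
    have hd0 : PySem.List.pyGetD (d0 :: rest) 0 0 = d0 := by
      simp [PySem.List.pyGetD, PySem.List.pyGet?, PySem.List.pyIdx?]
    rw [hd0] at h1 h2
    show checkRstOrderConsistant rst (d0 :: rest) permutation = _
    unfold checkRstOrderConsistant checkRstOrderConsistant_alt
    simp only []
    rw [hg, h1, h2]
    have hsum := pvSumGroups_append (d0 :: rest) gs last
    unfold pvSumGroups at hsum
    rw [hsum]
    unfold pvSumGroups
    rfl
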